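-- pv_equiv track=rewrite | github.com/mkolster/mkolster_project02 | Project pt2/user_ship_logic.py | user_battleship_check_dir
-- ===== SOURCE A (Python) =====
-- def user_battleship_check_dir(x, y, user_ships):
--     up = True
--     down = True
--     left = True
--     right = True
--
--     if x < 3:
--         left = False
--     elif x > 6:
--         right = False
--     elif 3 <= x <= 6:
--         left = False
--
--     if y < 13:
--         up = False
--     elif y > 16:
--         down = False
--     elif 13 <= y <= 16:
--         up = False
--
--     for i in range(1, 4):
--         if (x + i, y) in user_ships:
--             right = False
--         if (x - i, y) in user_ships:
--             left = False
--         if (x, y + i) in user_ships: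
--             down = False
--         if (x, y - i) in user_ships:
--             up = False
--
--
--     if up:
--         return 1
--     elif right:
--         return 2
--     elif down:
--         return 3
--     elif left:
--         return 4
-- ===== SOURCE B (Python) =====
-- def user_battleship_check_dir(x, y, user_ships):
--     # Inverted iteration: one pass over the ships, classifying each ship by its
--     # relative offset from (x, y), instead of membership-testing 12 neighbor cells.
--     bu, br, bd, bl = y <= 16, x > 6, y > 16, x <= 6
--     for sx, sy in user_ships:
--         dx, dy = sx - x, sy - y
--         if dy == 0 and 1 <= dx <= 3:
--             br = True
--         elif dy == 0 and -3 <= dx <= -1: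
--             bl = True
--         elif dx == 0 and 1 <= dy <= 3:
--             bd = True
--         elif dx == 0 and -3 <= dy <= -1:
--             bu = True
--     for code, blocked in enumerate((bu, br, bd, bl), 1):
--         if not blocked:
--             return code
--     return None
-- ===== Notes on version B (the rewrite author's own statement) =====
-- stated objective: alternative
-- what changed: Inverts the iteration: instead of A's four mutable flags cleared by 12 neighbor-cell membership scans of the ships list, B makes a single pass over the ships themselves, classifying each ship by its relative offset from (x, y) into a blocked-direction flag, then returns the first unblocked direction code.
import Mathlib
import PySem

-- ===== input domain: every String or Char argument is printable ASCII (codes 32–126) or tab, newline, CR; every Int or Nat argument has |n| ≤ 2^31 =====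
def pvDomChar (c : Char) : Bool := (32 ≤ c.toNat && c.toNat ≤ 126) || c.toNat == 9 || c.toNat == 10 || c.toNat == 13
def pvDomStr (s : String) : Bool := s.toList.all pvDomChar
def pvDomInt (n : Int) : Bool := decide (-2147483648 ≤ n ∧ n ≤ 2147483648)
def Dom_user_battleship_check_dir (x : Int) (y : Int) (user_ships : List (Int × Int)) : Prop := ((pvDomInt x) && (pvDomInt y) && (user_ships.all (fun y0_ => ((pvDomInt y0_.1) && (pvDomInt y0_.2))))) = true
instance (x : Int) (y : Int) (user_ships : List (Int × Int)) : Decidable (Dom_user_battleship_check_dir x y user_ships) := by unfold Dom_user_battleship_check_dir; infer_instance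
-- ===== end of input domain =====

-- B inverts the iteration: instead of membership-testing 12 neighbor cells against the
-- ships list, it makes one pass over the ships, classifying each ship by its relative
-- offset and accumulating blocked-direction flags (objective: alternative).

-- ===== PORT A =====
def user_battleship_check_dir (x : Int) (y : Int) (user_ships : List (Int × Int)) : Option Int :=
  let up := true
  let down := true
  let left := true
  let right := true
  let (left, right) :=
    if x < 3 then (false, right)
    else if x > 6 then (left, false)
    else if 3 ≤ x ∧ x ≤ 6 then (false, right)
    else (left, right)
  let (up, down) :=
    if y < 13 then (false, down)
    else if y > 16 then (up, false)
    else if 13 ≤ y ∧ y ≤ 16 then (false, down)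
    else (up, down)
  let s := (PySem.List.pyRange 1 4 1).foldl
    (fun (s : Bool × Bool × Bool × Bool) i =>
      let (up, down, left, right) := s
      let right := if (x + i, y) ∈ user_ships then false else right
      let left  := if (x - i, y) ∈ user_ships then false else left
      let down  := if (x, y + i) ∈ user_ships then false else down
      let up    := if (x, y - i) ∈ user_ships then false else up
      (up, down, left, right))
    (up, down, left, right)
  if s.1 then some 1
  else if s.2.2.2 then some 2
  else if s.2.1 then some 3
  else if s.2.2.1 then some 4
  else none

-- ===== PORT B =====
-- the 'for sx, sy in user_ships' classification loop of Source B
def pvAltStep (x : Int) (y : Int) (s : Bool × Bool × Bool × Bool) (p : Int × Int) :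
    Bool × Bool × Bool × Bool :=
  let (bu, br, bd, bl) := s
  let dx := p.1 - x
  let dy := p.2 - y
  if dy = 0 ∧ 1 ≤ dx ∧ dx ≤ 3 then (bu, true, bd, bl)
  else if dy = 0 ∧ -3 ≤ dx ∧ dx ≤ -1 then (bu, br, bd, true)
  else if dx = 0 ∧ 1 ≤ dy ∧ dy ≤ 3 then (bu, br, true, bl)
  else if dx = 0 ∧ -3 ≤ dy ∧ dy ≤ -1 then (true, br, bd, bl)
  else (bu, br, bd, bl)

-- the 'for code, blocked in enumerate(..., 1)' scan of Source B
def pvAltPick : Int → List Bool → Option Int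
  | _, [] => none
  | code, b :: rest => if !b then some code else pvAltPick (code + 1) rest

def user_battleship_check_dir_alt (x : Int) (y : Int) (user_ships : List (Int × Int)) : Option Int :=
  let init := (decide (y ≤ 16), decide (x > 6), decide (y > 16), decide (x ≤ 6))
  let s := user_ships.foldl (pvAltStep x y) init
  pvAltPick 1 [s.1, s.2.1, s.2.2.1, s.2.2.2]

-- ===== PRECONDITION & SPEC =====
def Spec_user_battleship_check_dir (x : Int) (y : Int) (user_ships : List (Int × Int)) (out : Option Int) : Prop := out = user_battleship_check_dir_alt x y user_ships
instance (x : Int) (y : Int) (user_ships : List (Int × Int)) (out : Option Int) : Decidable (Spec_user_battleship_check_dir x y user_ships out) := by unfold Spec_user_battleship_check_dir; infer_instance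

-- ===== CLAIM (what is proved, stated in full; the proofs are below) =====
def Claim_equal_user_battleship_check_dir : Prop := ∀ (x : Int) (y : Int) (user_ships : List (Int × Int)), Dom_user_battleship_check_dir x y user_ships → Spec_user_battleship_check_dir x y user_ships (user_battleship_check_dir x y user_ships)

-- ===== LEMMAS AND PROOFS =====

-- B's fold distributes over its initial state: each component is the initial flag
-- OR-ed with "some ship satisfies this direction's offset condition".
theorem pvAlt_fold_char (x y : Int) (us : List (Int × Int)) (s : Bool × Bool × Bool × Bool) :
    us.foldl (pvAltStep x y) s =
      (s.1 || us.any (fun p => decide (p.1 - x = 0 ∧ -3 ≤ p.2 - y ∧ p.2 - y ≤ -1)),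
       s.2.1 || us.any (fun p => decide (p.2 - y = 0 ∧ 1 ≤ p.1 - x ∧ p.1 - x ≤ 3)),
       s.2.2.1 || us.any (fun p => decide (p.1 - x = 0 ∧ 1 ≤ p.2 - y ∧ p.2 - y ≤ 3)),
       s.2.2.2 || us.any (fun p => decide (p.2 - y = 0 ∧ -3 ≤ p.1 - x ∧ p.1 - x ≤ -1))) := by
  induction us generalizing s with
  | nil => simp
  | cons p rest ih =>
    obtain ⟨bu, br, bd, bl⟩ := s
    simp only [List.foldl_cons, List.any_cons, ih]
    unfold pvAltStep
    dsimp only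
    split_ifs with h1 h2 h3 h4 <;>
      cases hu : decide (p.1 - x = 0 ∧ -3 ≤ p.2 - y ∧ p.2 - y ≤ -1) <;>
      cases hr : decide (p.2 - y = 0 ∧ 1 ≤ p.1 - x ∧ p.1 - x ≤ 3) <;>
      cases hd : decide (p.1 - x = 0 ∧ 1 ≤ p.2 - y ∧ p.2 - y ≤ 3) <;>
      cases hl : decide (p.2 - y = 0 ∧ -3 ≤ p.1 - x ∧ p.1 - x ≤ -1) <;>
      simp only [hu, hr, hd, hl] <;>
      simp only [decide_eq_true_eq, decide_eq_false_iff_not] at hu hr hd hl <;>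
      first
        | omega
        | simp

-- A's neighbor loop distributes likewise: each flag is AND-ed with
-- "no probed cell at any offset i is a ship".
theorem pvA_fold_char (x y : Int) (us : List (Int × Int)) (s : Bool × Bool × Bool × Bool)
    (is : List Int) :
    is.foldl
      (fun (s : Bool × Bool × Bool × Bool) i =>
        let (up, down, left, right) := s
        let right := if (x + i, y) ∈ us then false else right
        let left  := if (x - i, y) ∈ us then false else left
        let down  := if (x, y + i) ∈ us then false else down
        let up    := if (x, y - i) ∈ us then false else up
        (up, down, left, right)) s =
      (s.1 && !(is.any fun i => decide ((x, y - i) ∈ us)),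
       s.2.1 && !(is.any fun i => decide ((x, y + i) ∈ us)),
       s.2.2.1 && !(is.any fun i => decide ((x - i, y) ∈ us)),
       s.2.2.2 && !(is.any fun i => decide ((x + i, y) ∈ us))) := by
  induction is generalizing s with
  | nil => simp
  | cons i rest ih =>
    simp only [List.foldl_cons, List.any_cons, ih]
    obtain ⟨u, d, l, r⟩ := s
    by_cases m1 : (x + i, y) ∈ us <;> by_cases m2 : (x - i, y) ∈ us <;>
      by_cases m3 : (x, y + i) ∈ us <;> by_cases m4 : (x, y - i) ∈ us <;>
      simp [m1, m2, m3, m4]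

-- bridges: "some ship at this offset" over the ships ↔ "some probed cell is a ship"
theorem pvBridge_u (x y : Int) (us : List (Int × Int)) :
    (us.any fun p => decide (p.1 - x = 0 ∧ -3 ≤ p.2 - y ∧ p.2 - y ≤ -1)) =
      (([1, 2, 3] : List Int).any fun i => decide ((x, y - i) ∈ us)) := by
  rw [Bool.eq_iff_iff]
  simp only [List.any_eq_true, decide_eq_true_eq]
  constructor
  · rintro ⟨⟨a, b⟩, hp, h⟩
    dsimp only at h
    refine ⟨y - b, by simp; omega, ?_⟩
    have he : (x, y - (y - b)) = ((a, b) : Int × Int) := by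
      simp only [Prod.mk.injEq]; omega
    rw [he]; exact hp
  · rintro ⟨i, hi, h⟩
    exact ⟨(x, y - i), h, by simp at hi ⊢; omega⟩

theorem pvBridge_r (x y : Int) (us : List (Int × Int)) :
    (us.any fun p => decide (p.2 - y = 0 ∧ 1 ≤ p.1 - x ∧ p.1 - x ≤ 3)) =
      (([1, 2, 3] : List Int).any fun i => decide ((x + i, y) ∈ us)) := by
  rw [Bool.eq_iff_iff]
  simp only [List.any_eq_true, decide_eq_true_eq]
  constructor
  · rintro ⟨⟨a, b⟩, hp, h⟩
    dsimp only at h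
    refine ⟨a - x, by simp; omega, ?_⟩
    have he : (x + (a - x), y) = ((a, b) : Int × Int) := by
      simp only [Prod.mk.injEq]; omega
    rw [he]; exact hp
  · rintro ⟨i, hi, h⟩
    exact ⟨(x + i, y), h, by simp at hi ⊢; omega⟩

theorem pvBridge_d (x y : Int) (us : List (Int × Int)) :
    (us.any fun p => decide (p.1 - x = 0 ∧ 1 ≤ p.2 - y ∧ p.2 - y ≤ 3)) =
      (([1, 2, 3] : List Int).any fun i => decide ((x, y + i) ∈ us)) := by
  rw [Bool.eq_iff_iff]
  simp only [List.any_eq_true, decide_eq_true_eq]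
  constructor
  · rintro ⟨⟨a, b⟩, hp, h⟩
    dsimp only at h
    refine ⟨b - y, by simp; omega, ?_⟩
    have he : (x, y + (b - y)) = ((a, b) : Int × Int) := by
      simp only [Prod.mk.injEq]; omega
    rw [he]; exact hp
  · rintro ⟨i, hi, h⟩
    exact ⟨(x, y + i), h, by simp at hi ⊢; omega⟩

theorem pvBridge_l (x y : Int) (us : List (Int × Int)) :
    (us.any fun p => decide (p.2 - y = 0 ∧ -3 ≤ p.1 - x ∧ p.1 - x ≤ -1)) =
      (([1, 2, 3] : List Int).any fun i => decide ((x - i, y) ∈ us)) := by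
  rw [Bool.eq_iff_iff]
  simp only [List.any_eq_true, decide_eq_true_eq]
  constructor
  · rintro ⟨⟨a, b⟩, hp, h⟩
    dsimp only at h
    refine ⟨x - a, by simp; omega, ?_⟩
    have he : (x - (x - a), y) = ((a, b) : Int × Int) := by
      simp only [Prod.mk.injEq]; omega
    rw [he]; exact hp
  · rintro ⟨i, hi, h⟩
    exact ⟨(x - i, y), h, by simp at hi ⊢; omega⟩

-- ===== VERDICT (by name: the statement is the Claim_ definition above) =====
set_option maxHeartbeats 2000000 in
theorem user_battleship_check_dir_spec : Claim_equal_user_battleship_check_dir := by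
  intro x y us _
  show user_battleship_check_dir x y us = user_battleship_check_dir_alt x y us
  have hrange : PySem.List.pyRange 1 4 1 = [1, 2, 3] := by decide
  unfold user_battleship_check_dir user_battleship_check_dir_alt
  simp only [hrange, pvAlt_fold_char, pvA_fold_char, pvBridge_u, pvBridge_r, pvBridge_d,
    pvBridge_l, pvAltPick]
  cases hau : ([1, 2, 3] : List Int).any fun i => decide ((x, y - i) ∈ us) <;>
  cases har : ([1, 2, 3] : List Int).any fun i => decide ((x + i, y) ∈ us) <;>
  cases had : ([1, 2, 3] : List Int).any fun i => decide ((x, y + i) ∈ us) <;>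
  cases hal : ([1, 2, 3] : List Int).any fun i => decide ((x - i, y) ∈ us) <;>
  simp only [Bool.and_true, Bool.and_false, Bool.not_true, Bool.not_false,
    Bool.or_true, Bool.or_false] <;>
  clear hau har had hal <;>
  split_ifs <;> (try simp_all) <;> (try omega)
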